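-- pv_equiv track=rewrite | github.com/Linellian/this_shit_i_always_get_an_f_for | ft_pos_neg_separator_lst.py | ft_pos_neg_separator_lst
-- ===== SOURCE A (Python) =====
-- def ft_pos_neg_separator_lst(lst):
--     neg = []
--     pos = []
--     zero = []
--     for i in lst:
--         if i > 0:
--             pos.append(i)
--         elif i < 0:
--             neg.append(i)
--         elif i == 0:
--             zero.append(i)
--     lst = []
--     lst.append(neg)
--     lst.append(zero)
--     lst.append(pos)
--     return lst
-- ===== SOURCE B (Python) =====
-- def ft_pos_neg_separator_lst(lst):
--     return [[i for i in lst if i < 0],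
--             [i for i in lst if i == 0],
--             [i for i in lst if i > 0]]
-- ===== Notes on version B (the rewrite author's own statement) =====
-- stated objective: simpler
-- what changed: Replaces A's single categorizing loop with three mutable accumulators by three independent filter passes, one per bucket.
import Mathlib
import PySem

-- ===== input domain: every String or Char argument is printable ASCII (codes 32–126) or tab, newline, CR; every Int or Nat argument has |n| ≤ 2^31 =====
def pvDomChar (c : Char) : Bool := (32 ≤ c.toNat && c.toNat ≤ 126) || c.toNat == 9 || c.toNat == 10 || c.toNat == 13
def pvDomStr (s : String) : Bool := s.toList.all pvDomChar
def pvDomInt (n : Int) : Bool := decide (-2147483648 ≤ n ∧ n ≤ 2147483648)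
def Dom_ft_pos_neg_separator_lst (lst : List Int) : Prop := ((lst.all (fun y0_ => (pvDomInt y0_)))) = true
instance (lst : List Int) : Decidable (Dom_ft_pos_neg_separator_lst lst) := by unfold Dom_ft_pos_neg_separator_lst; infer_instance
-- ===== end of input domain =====

-- B replaces A's single categorizing loop with three independent filter passes (one per bucket); objective: simpler.


-- ===== PORT A =====
-- A's loop: three accumulators, each element appended to pos / neg / zero by the branch order of A.
def ft_pos_neg_separator_lst (lst : List Int) : List (List Int) :=
  let st := lst.foldl (fun (acc : List Int × List Int × List Int) i =>
    let (neg, pos, zero) := acc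
    if i > 0 then (neg, pos ++ [i], zero)
    else if i < 0 then (neg ++ [i], pos, zero)
    else if i = 0 then (neg, pos, zero ++ [i])
    else acc) ([], [], [])
  [st.1, st.2.2, st.2.1]

-- ===== PORT B =====
def ft_pos_neg_separator_lst_alt (lst : List Int) : List (List Int) :=
  [lst.filter (fun i => i < 0), lst.filter (fun i => i = 0), lst.filter (fun i => i > 0)]

-- ===== PRECONDITION & SPEC =====
def Spec_ft_pos_neg_separator_lst (lst : List Int) (out : List (List Int)) : Prop := out = ft_pos_neg_separator_lst_alt lst
instance (lst : List Int) (out : List (List Int)) : Decidable (Spec_ft_pos_neg_separator_lst lst out) := by unfold Spec_ft_pos_neg_separator_lst; infer_instance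

-- ===== CLAIM (what is proved, stated in full; the proofs are below) =====
def Claim_equal_ft_pos_neg_separator_lst : Prop := ∀ (lst : List Int), Dom_ft_pos_neg_separator_lst lst → Spec_ft_pos_neg_separator_lst lst (ft_pos_neg_separator_lst lst)

-- ===== LEMMAS AND PROOFS =====
theorem pv_fold_inv (lst neg pos zero : List Int) :
    lst.foldl (fun (acc : List Int × List Int × List Int) i =>
      let (neg, pos, zero) := acc
      if i > 0 then (neg, pos ++ [i], zero)
      else if i < 0 then (neg ++ [i], pos, zero)
      else if i = 0 then (neg, pos, zero ++ [i])
      else acc) (neg, pos, zero)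
    = (neg ++ lst.filter (fun i => i < 0),
       pos ++ lst.filter (fun i => i > 0),
       zero ++ lst.filter (fun i => i = 0)) := by
  induction lst generalizing neg pos zero with
  | nil => simp
  | cons x xs ih =>
    simp only [List.foldl_cons, List.filter_cons]
    rcases lt_trichotomy x 0 with h | h | h
    · have h1 : ¬ x > 0 := by omega
      have h2 : x < 0 := h
      simp [h1, h2, ih, List.append_assoc]
      omega
    · subst h
      simp [ih, List.append_assoc]
    · simp [h, ih, List.append_assoc]
      omega

-- ===== VERDICT (by name: the statement is the Claim_ definition above) =====
theorem ft_pos_neg_separator_lst_spec : Claim_equal_ft_pos_neg_separator_lst := by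
  intro lst _
  unfold Spec_ft_pos_neg_separator_lst ft_pos_neg_separator_lst ft_pos_neg_separator_lst_alt
  simp [pv_fold_inv]
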